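/- GENERATED by c/gen_decode.py: decode facts of the image, one per distinct instruction byte string. -/
import UserX.DecodeImage

#decode_all Vorbis.Dec
  "0f570d20640100"  -- xorps xmm1,XMMWORD PTR [rip+0x16420]
  "0f84a6000000"  -- je 114ac9
  "0f8577ffffff"  -- jne 10dd6c
  "0f8d8c000000"  -- jge 10d2ac
  "0fb603"  -- movzx eax,BYTE PTR [rbx]
  "21f0"  -- and eax,esi
  "3c56"  -- cmp al,0x56
  "410fb706"  -- movzx eax,WORD PTR [r14]
  "41833e00"  -- cmp DWORD PTR [r14],0x0
  "4189c4"  -- mov r12d,eax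
  "418d4f01"  -- lea ecx,[r15+0x1]
  "41f686d306000004"  -- test BYTE PTR [r14+0x6d3],0x4
  "440fbfeb"  -- movsx r13d,bx
  "4488630d"  -- mov BYTE PTR [rbx+0xd],r12b
  "4489abf4060000"  -- mov DWORD PTR [rbx+0x6f4],r13d
  "448b65ec"  -- mov r12d,DWORD PTR [rbp-0x14]
  "448d6001"  -- lea r12d,[rax+0x1]
  "458927"  -- mov DWORD PTR [r15],r12d
  "458bb6e4060000"  -- mov r14d,DWORD PTR [r14+0x6e4]
  "480fbff3"  -- movsx rsi,bx
  "4863ed"  -- movsxd rbp,ebp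
  "4883e7f0"  -- and rdi,0xfffffffffffffff0
  "48896c2418"  -- mov QWORD PTR [rsp+0x18],rbp
  "488b4330"  -- mov rax,QWORD PTR [rbx+0x30]
  "488b8578ffffff"  -- mov rax,QWORD PTR [rbp-0x88]
  "488d53a0"  -- lea rdx,[rbx-0x60]
  "488d7c2430"  -- lea rdi,[rsp+0x30]
  "488dbb38060000"  -- lea rdi,[rbx+0x638]
  "488dbd40010000"  -- lea rdi,[rbp+0x140]
  "48c7433000000000"  -- mov QWORD PTR [rbx+0x30],0x0
  "49036e20"  -- add rbp,QWORD PTR [r14+0x20]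
  "49891424"  -- mov QWORD PTR [r12],rdx
  "498d3c9e"  -- lea rdi,[r14+rbx*4]
  "498dbc2484000000"  -- lea rdi,[r12+0x84]
  "4a8984f4a0000000"  -- mov QWORD PTR [rsp+r14*8+0xa0],rax
  "4c01f5"  -- add rbp,r14
  "4c896c2428"  -- mov QWORD PTR [rsp+0x28],r13
  "4c8b6c2420"  -- mov r13,QWORD PTR [rsp+0x20]
  "4c8d606c"  -- lea r12,[rax+0x6c]
  "4d85e4"  -- test r12,r12
  "4e8d3428"  -- lea r14,[rax+r13*1]
  "660f7ee5"  -- movd ebp,xmm4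
  "6643890466"  -- mov WORD PTR [r14+r12*2],ax
  "7332"  -- jae 101639
  "746e"  -- je 114ec6
  "75cc"  -- jne 101905
  "7d03"  -- jge 10e5ff
  "7f12"  -- jg 113f8e
  "81fbff030000"  -- cmp ebx,0x3ff
  "83e80b"  -- sub eax,0xb
  "894c242c"  -- mov DWORD PTR [rsp+0x2c],ecx
  "89abf0060000"  -- mov DWORD PTR [rbx+0x6f0],ebp
  "8b44247c"  -- mov eax,DWORD PTR [rsp+0x7c]
  "8b83e0010000"  -- mov eax,DWORD PTR [rbx+0x1e0]
  "8d68fc"  -- lea ebp,[rax-0x4]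
  "be20000000"  -- mov esi,0x20
  "c744240c00000000"  -- mov DWORD PTR [rsp+0xc],0x0
  "c783f0060000feffffff"  -- mov DWORD PTR [rbx+0x6f0],0xfffffffe
  "e80690ffff"  -- call 10d040
  "e80fabfeff"  -- call 1003c0
  "e8198fffff"  -- call 10cc80
  "e82370ffff"  -- call 100720
  "e82ca0feff"  -- call 100300
  "e836a8feff"  -- call 100640
  "e8418effff"  -- call 10d1c0
  "e84bbaffff"  -- call 100480
  "e8567affff"  -- call 10b8e0
  "e863f8feff"  -- call 100560
  "e86fa6ffff"  -- call 100640
  "e87a6bfeff"  -- call 100720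
  "e885d9feff"  -- call 103d00
  "e88fedfeff"  -- call 1003c0
  "e899f2feff"  -- call 1008e0
  "e8a4bffeff"  -- call 1008e0
  "e8af76ffff"  -- call 100640
  "e8b854ffff"  -- call 100800
  "e8c2defeff"  -- call 104100
  "e8cc12ffff"  -- call 100640
  "e8d6adffff"  -- call 100640
  "e8e0f4feff"  -- call 103d00
  "e8ea3cffff"  -- call 100640
  "e8f1c4feff"  -- call 100720
  "e8fd85ffff"  -- call 100640
  "e935fdffff"  -- jmp 10dc9e
  "e97bffffff"  -- jmp 10cd44
  "e9d2feffff"  -- jmp 115499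
  "eb38"  -- jmp 103ee3
  "ebc4"  -- jmp 108fe1
  "f20f111424"  -- movsd QWORD PTR [rsp],xmm2
  "f20f59d3"  -- mulsd xmm2,xmm3
  "f30f1043ec"  -- movss xmm0,DWORD PTR [rbx-0x14]
  "f30f1065c0"  -- movss xmm4,DWORD PTR [rbp-0x40]
  "f30f114500"  -- movss DWORD PTR [rbp+0x0],xmm0
  "f30f1165b8"  -- movss DWORD PTR [rbp-0x48],xmm4
  "f30f5845f4"  -- addss xmm0,DWORD PTR [rbp-0xc]
  "f30f597520"  -- mulss xmm6,DWORD PTR [rbp+0x20]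
  "f30f5ce2"  -- subss xmm4,xmm2
  "f3410f114c2408"  -- movss DWORD PTR [r12+0x8],xmm1
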